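-- pv_equiv track=rewrite | github.com/Vijaykumar933/Data_Stuctures_Algorithms | utils/problems.py | twice
-- ===== SOURCE A (Python) =====
-- def twice(s):
--     if len(s) == 0:
--         return False
--     look_up = set()
--     for char in s:
--         if char not in look_up:
--             look_up.add(char)
--         else:
--             return char
-- ===== SOURCE B (Python) =====
-- def twice(s):
--     if len(s) == 0:
--         return False
--     best = -1
--     for char in dict.fromkeys(s):
--         second = s.find(char, s.find(char) + 1)
--         if second != -1 and (best == -1 or second < best):
--             best = second
--     if best == -1:
--         return None
--     return s[best]
-- ===== Notes on version B (the rewrite author's own statement) =====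
-- stated objective: alternative
-- what changed: B replaces A's single seen-set scan by a staged computation: for each distinct character it locates that character's second occurrence with two str.find calls and returns the character at the minimal such index.
-- outside the precondition, e.g. on twice(''): A returns False, B returns False
import Mathlib
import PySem

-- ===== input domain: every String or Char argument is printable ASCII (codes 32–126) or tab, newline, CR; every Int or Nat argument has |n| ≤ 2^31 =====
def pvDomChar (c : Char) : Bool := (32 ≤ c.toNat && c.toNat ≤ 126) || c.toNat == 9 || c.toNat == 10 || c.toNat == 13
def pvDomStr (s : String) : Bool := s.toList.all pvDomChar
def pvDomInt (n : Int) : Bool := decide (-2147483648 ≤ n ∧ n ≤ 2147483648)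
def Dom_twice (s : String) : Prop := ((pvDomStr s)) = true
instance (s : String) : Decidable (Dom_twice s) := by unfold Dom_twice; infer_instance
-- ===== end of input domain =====

-- B finds the first repeated character by a staged min-of-second-occurrences computation (two str.find per distinct char) instead of A's single seen-set scan.


-- ===== PORT A =====
-- 'for char in s: if char not in look_up: look_up.add(char) else: return char'
def twiceLoop : List Char → PySem.Set Char → Option String
  | [], _ => none
  | c :: rest, lookUp =>
      if c ∈ lookUp then some (String.ofList [c])
      else twiceLoop rest (PySem.Set.add lookUp c)

-- 'if len(s) == 0: return False' — that return is a bool, not a string/None; excluded by Pre_twice.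
def twice (s : String) : Option String :=
  if s.toList.length = 0 then none
  else twiceLoop s.toList PySem.Set.empty

-- ===== PORT B =====
-- 'second = s.find(char, s.find(char) + 1)'
def pvSecond (l : List Char) (c : Char) : Int :=
  PySem.Chars.findFrom l [c] (PySem.Chars.find l [c] + 1)

-- 'for char in dict.fromkeys(s): … if second != -1 and (best == -1 or second < best): best = second'
def twiceAltLoop (l : List Char) : List Char → Int → Int
  | [], best => best
  | c :: cs, best =>
      let second := pvSecond l c
      twiceAltLoop l cs (if second ≠ -1 ∧ (best = -1 ∨ second < best) then second else best)

-- 'return s[best]' is a 1-character string; PySem models indexing as a Char, so the port wraps it in a singleton string.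
def twice_alt (s : String) : Option String :=
  if s.toList.length = 0 then none
  else
    let best := twiceAltLoop s.toList (PySem.List.dedup s.toList) (-1)
    if best = -1 then none
    else (PySem.Chars.pyGet? s.toList best).map (fun c => String.ofList [c])

-- ===== PRECONDITION & SPEC =====
-- Pre_ excludes the empty string, on which A returns False — a bool, not a value of the declared Optional[str] type.
def Pre_twice (s : String) : Prop := s ≠ ""
instance (s : String) : Decidable (Pre_twice s) := by unfold Pre_twice; infer_instance
def pvWitness_twice : String := "ab"

def Spec_twice (s : String) (out : Option String) : Prop := out = twice_alt s
instance (s : String) (out : Option String) : Decidable (Spec_twice s out) := by unfold Spec_twice; infer_instance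

-- ===== CLAIM (what is proved, stated in full; the proofs are below) =====
def Claim_equal_twice : Prop := ∀ (s : String), Dom_twice s → Pre_twice s → Spec_twice s (twice s)

-- ===== LEMMAS AND PROOFS =====

-- position j holds a character already seen earlier
def DupAt (l : List Char) (j : Nat) : Prop := ∃ c, l[j]? = some c ∧ c ∈ l.take j

-- A's loop, re-expressed with the consumed prefix made explicit
def firstDup? : List Char → List Char → Option (Nat × Char)
  | _, [] => none
  | pre, c :: r => if c ∈ pre then some (pre.length, c) else firstDup? (pre ++ [c]) r

theorem singleton_prefix_drop (l : List Char) (i : Nat) (c : Char) :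
    [c] <+: l.drop i ↔ l[i]? = some c := by
  have h0 : (l.drop i)[0]? = l[i]? := by
    simp [@List.getElem?_drop Char l i 0]
  rw [← h0]
  cases hX : l.drop i with
  | nil => simp
  | cons d t =>
    simp only [List.cons_prefix_cons, List.nil_prefix, and_true, List.getElem?_cons_zero]
    constructor
    · rintro rfl; rfl
    · intro h; injection h with h; exact h.symm

theorem mem_take_iff (l : List Char) (j : Nat) (c : Char) :
    c ∈ l.take j ↔ ∃ m, m < j ∧ l[m]? = some c := by
  rw [List.mem_iff_getElem?]
  constructor
  · rintro ⟨m, hm⟩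
    rw [List.getElem?_take] at hm
    by_cases hmj : m < j
    · exact ⟨m, hmj, by simpa [hmj] using hm⟩
    · simp [hmj] at hm
  · rintro ⟨m, hmj, hm⟩
    exact ⟨m, by rw [List.getElem?_take]; simp [hmj, hm]⟩

theorem singleton_infix (l : List Char) (c : Char) : [c] <:+: l ↔ c ∈ l := by
  constructor
  · rintro ⟨u, v, huv⟩
    have : c ∈ u ++ [c] ++ v := by simp
    rw [huv] at this; exact this
  · intro h
    obtain ⟨u, v, huv⟩ := List.append_of_mem h
    exact ⟨u, v, by simp [huv]⟩

theorem twiceLoop_eq_firstDup (rest : List Char) : ∀ (pre : List Char) (lookUp : PySem.Set Char),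
    (∀ c, c ∈ lookUp ↔ c ∈ pre) →
    twiceLoop rest lookUp = (firstDup? pre rest).map (fun p => String.ofList [p.2]) := by
  induction rest with
  | nil => intro pre lookUp h; simp [twiceLoop, firstDup?]
  | cons c r ih =>
    intro pre lookUp h
    rw [twiceLoop, firstDup?]
    by_cases hc : c ∈ pre
    · simp [(h c).mpr hc, hc]
    · have hc' : c ∉ lookUp := fun hm => hc ((h c).mp hm)
      simp only [hc, hc', if_false]
      exact ih (pre ++ [c]) _ (by intro d; rw [PySem.Set.mem_add, h d]; simp)

theorem firstDup?_none (rest : List Char) : ∀ (pre : List Char),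
    firstDup? pre rest = none → ∀ j, pre.length ≤ j → ¬ DupAt (pre ++ rest) j := by
  induction rest with
  | nil =>
    intro pre _ j hj
    rintro ⟨c, hc, -⟩
    rw [List.append_nil, List.getElem?_eq_none hj] at hc
    exact absurd hc (by simp)
  | cons c r ih =>
    intro pre h
    rw [firstDup?] at h
    by_cases hc : c ∈ pre
    · simp [hc] at h
    · rw [if_neg hc] at h
      have h' := ih (pre ++ [c]) h
      intro j hj hdup
      have hget : (pre ++ c :: r)[pre.length]? = some c := by
        rw [List.getElem?_append_right (Nat.le_refl _)]; simp
      have htake : (pre ++ c :: r).take pre.length = pre := by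
        rw [List.take_append_of_le_length (Nat.le_refl _)]; simp
      rcases Nat.eq_or_lt_of_le hj with heq | hlt
      · obtain ⟨c', hc1, hc2⟩ := hdup
        rw [← heq] at hc1 hc2
        rw [hget] at hc1
        injection hc1 with hc1
        rw [htake, ← hc1] at hc2
        exact hc hc2
      · have := h' j (by simpa using hlt)
        rw [List.append_assoc, List.singleton_append] at this
        exact this hdup

theorem firstDup?_some (rest : List Char) : ∀ (pre : List Char) (i : Nat) (c : Char),
    firstDup? pre rest = some (i, c) →
    pre.length ≤ i ∧ (pre ++ rest)[i]? = some c ∧ c ∈ (pre ++ rest).take i ∧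
      ∀ j, pre.length ≤ j → j < i → ¬ DupAt (pre ++ rest) j := by
  induction rest with
  | nil => intro pre i c h; exact absurd h (by simp [firstDup?])
  | cons c r ih =>
    intro pre i c' h
    rw [firstDup?] at h
    have hget : (pre ++ c :: r)[pre.length]? = some c := by
      rw [List.getElem?_append_right (Nat.le_refl _)]; simp
    have htake : (pre ++ c :: r).take pre.length = pre := by
      rw [List.take_append_of_le_length (Nat.le_refl _)]; simp
    by_cases hc : c ∈ pre
    · rw [if_pos hc] at h
      injection h with h
      obtain ⟨rfl, rfl⟩ : pre.length = i ∧ c = c' := by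
        constructor <;> [exact congrArg Prod.fst h; exact congrArg Prod.snd h]
      exact ⟨Nat.le_refl _, hget, by rw [htake]; exact hc, fun j h1 h2 => absurd (Nat.lt_of_le_of_lt h1 h2) (Nat.lt_irrefl _)⟩
    · rw [if_neg hc] at h
      have h' := ih (pre ++ [c]) i c' h
      rw [List.append_assoc, List.singleton_append] at h'
      obtain ⟨h1, h2, h3, h4⟩ := h'
      have hlen : pre.length ≤ i := by simp at h1; omega
      refine ⟨hlen, h2, h3, fun j hj1 hj2 => ?_⟩
      rcases Nat.eq_or_lt_of_le hj1 with heq | hlt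
      · rintro ⟨c'', hc1, hc2⟩
        rw [← heq] at hc1 hc2
        rw [hget] at hc1
        injection hc1 with hc1
        rw [htake, ← hc1] at hc2
        exact hc hc2
      · exact h4 j (by simpa using hlt) hj2

theorem pvSecond_neg (l : List Char) (c : Char) (hc : c ∈ l) (h : pvSecond l c = -1) :
    ∀ j, ¬ (l[j]? = some c ∧ c ∈ l.take j) := by
  have hf0 : 0 ≤ PySem.Chars.find l [c] :=
    (PySem.Chars.find_nonneg_iff l [c]).mpr ((singleton_infix l c).mpr hc)
  obtain ⟨hpre, hmin⟩ := PySem.Chars.find_spec hf0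
  have hfc : l[(PySem.Chars.find l [c]).toNat]? = some c := (singleton_prefix_drop _ _ _).mp hpre
  have hflt : (PySem.Chars.find l [c]).toNat < l.length := by
    obtain ⟨hw, -⟩ := List.getElem?_eq_some_iff.mp hfc; exact hw
  have hk : (PySem.Chars.find l [c]).toNat + 1 ≤ l.length := hflt
  have hcast : PySem.Chars.find l [c] + 1 = (((PySem.Chars.find l [c]).toNat + 1 : Nat) : Int) := by
    push_cast; omega
  rw [pvSecond, hcast] at h
  have hno := (PySem.Chars.findFrom_natCast_eq_neg_one_iff l [c] _ hk).mp h
  intro j hj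
  obtain ⟨hj1, hj2⟩ := hj
  obtain ⟨m, hmj, hm⟩ := (mem_take_iff l j c).mp hj2
  -- every occurrence index is ≥ the first one
  have hocc : ∀ n, l[n]? = some c → (PySem.Chars.find l [c]).toNat ≤ n := by
    intro n hn
    by_contra hlt
    exact hmin n (Nat.lt_of_not_le hlt) ((singleton_prefix_drop l n c).mpr hn)
  have hjge : (PySem.Chars.find l [c]).toNat + 1 ≤ j :=
    Nat.lt_of_le_of_lt (hocc m hm) hmj
  -- so [c] occurs in the dropped part, contradiction
  apply hno
  have hp : [c] <+: (l.drop ((PySem.Chars.find l [c]).toNat + 1)).drop (j - ((PySem.Chars.find l [c]).toNat + 1)) := by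
    rw [List.drop_drop]
    apply (singleton_prefix_drop l _ c).mpr
    rw [Nat.add_sub_cancel' hjge]
    exact hj1
  exact hp.isInfix.trans (List.drop_suffix _ _).isInfix

theorem pvSecond_pos (l : List Char) (c : Char) (hc : c ∈ l) (h : pvSecond l c ≠ -1) :
    ∃ j : Nat, pvSecond l c = (j : Int) ∧ l[j]? = some c ∧ c ∈ l.take j ∧
      ∀ k, k < j → ¬ (l[k]? = some c ∧ c ∈ l.take k) := by
  have hf0 : 0 ≤ PySem.Chars.find l [c] :=
    (PySem.Chars.find_nonneg_iff l [c]).mpr ((singleton_infix l c).mpr hc)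
  obtain ⟨hpre, hmin⟩ := PySem.Chars.find_spec hf0
  have hfc : l[(PySem.Chars.find l [c]).toNat]? = some c := (singleton_prefix_drop _ _ _).mp hpre
  have hflt : (PySem.Chars.find l [c]).toNat < l.length := by
    obtain ⟨hw, -⟩ := List.getElem?_eq_some_iff.mp hfc; exact hw
  have hk : (PySem.Chars.find l [c]).toNat + 1 ≤ l.length := hflt
  have hcast : PySem.Chars.find l [c] + 1 = (((PySem.Chars.find l [c]).toNat + 1 : Nat) : Int) := by
    push_cast; omega
  rw [pvSecond, hcast] at h ⊢
  obtain ⟨hkle, hpre2, hmin2⟩ := PySem.Chars.findFrom_natCast_spec l [c] _ hk h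
  have hocc : ∀ n, l[n]? = some c → (PySem.Chars.find l [c]).toNat ≤ n := by
    intro n hn
    by_contra hlt
    exact hmin n (Nat.lt_of_not_le hlt) ((singleton_prefix_drop l n c).mpr hn)
  refine ⟨(PySem.Chars.findFrom l [c] ((((PySem.Chars.find l [c]).toNat + 1 : Nat) : Int))).toNat, by omega, ?_, ?_, ?_⟩
  · exact (singleton_prefix_drop l _ c).mp hpre2
  · apply (mem_take_iff l _ c).mpr
    exact ⟨(PySem.Chars.find l [c]).toNat, by omega, hfc⟩
  · intro k hk2
    rintro ⟨h1, h2⟩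
    by_cases hcase : (PySem.Chars.find l [c]).toNat + 1 ≤ k
    · exact hmin2 k hcase hk2 ((singleton_prefix_drop l k c).mpr h1)
    · have hke : k = (PySem.Chars.find l [c]).toNat := by
        have := hocc k h1; omega
      obtain ⟨m, hm1, hm2⟩ := (mem_take_iff l k c).mp h2
      have := hocc m hm2; omega

theorem altLoop_none (l : List Char) (cs : List Char)
    (h : ∀ c ∈ cs, pvSecond l c = -1) : twiceAltLoop l cs (-1) = -1 := by
  induction cs with
  | nil => rfl
  | cons c r ih =>
    rw [twiceAltLoop]
    have hc := h c (by simp)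
    simp only [hc]
    rw [if_neg (by simp)]
    exact ih (fun d hd => h d (by simp [hd]))

theorem altLoop_stick (l : List Char) (i : Nat) (cs : List Char)
    (h : ∀ c ∈ cs, pvSecond l c = -1 ∨ (i : Int) ≤ pvSecond l c) :
    twiceAltLoop l cs (i : Int) = (i : Int) := by
  induction cs with
  | nil => rfl
  | cons c r ih =>
    rw [twiceAltLoop]
    have hcond : ¬(pvSecond l c ≠ -1 ∧ ((i : Int) = -1 ∨ pvSecond l c < (i : Int))) := by
      rcases h c (by simp) with h1 | h1
      · simp [h1]
      · rintro ⟨-, h2 | h2⟩ <;> omega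
    rw [if_neg hcond]
    exact ih (fun d hd => h d (by simp [hd]))

theorem altLoop_reach (l : List Char) (i : Nat) (c0 : Char) (cs : List Char)
    (hc0 : c0 ∈ cs) (hsec : pvSecond l c0 = (i : Int))
    (h : ∀ c ∈ cs, pvSecond l c = -1 ∨ (i : Int) ≤ pvSecond l c) :
    ∀ best, (best = -1 ∨ (i : Int) ≤ best) → twiceAltLoop l cs best = (i : Int) := by
  induction cs with
  | nil => cases hc0
  | cons d r ih =>
    intro best hbest
    rw [twiceAltLoop]
    rcases List.mem_cons.mp hc0 with rfl | hc0r
    · -- head is the character whose second occurrence is the global minimum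
      rw [hsec]
      have hbr : (∀ c ∈ r, pvSecond l c = -1 ∨ (i : Int) ≤ pvSecond l c) :=
        fun d hd => h d (by simp [hd])
      by_cases hcond : ((i : Int) ≠ -1 ∧ (best = -1 ∨ (i : Int) < best))
      · rw [if_pos hcond]; exact altLoop_stick l i r hbr
      · have hbe : best = (i : Int) := by
          rcases hbest with h1 | h1
          · exact absurd ⟨by omega, Or.inl h1⟩ hcond
          · by_cases h2 : (i : Int) < best
            · exact absurd ⟨by omega, Or.inr h2⟩ hcond
            · omega
        rw [if_neg hcond, hbe]
        exact altLoop_stick l i r hbr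
    · -- head is some other character; the running best stays -1 or ≥ i
      have hbr : (∀ c ∈ r, pvSecond l c = -1 ∨ (i : Int) ≤ pvSecond l c) :=
        fun c hcm => h c (by simp [hcm])
      have hd := h d (by simp)
      by_cases hcond : (pvSecond l d ≠ -1 ∧ (best = -1 ∨ pvSecond l d < best))
      · rw [if_pos hcond]
        refine ih hc0r hbr _ ?_
        rcases hd with h1 | h1
        · exact absurd h1 hcond.1
        · exact Or.inr h1
      · rw [if_neg hcond]
        exact ih hc0r hbr best hbest

theorem twice_eq_alt (s : String) : twice s = twice_alt s := by
  by_cases hlen : s.toList.length = 0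
  · simp [twice, twice_alt, hlen]
  · have hA := twiceLoop_eq_firstDup s.toList [] PySem.Set.empty
      (by intro c; simp [PySem.Set.empty])
    rcases hfd : firstDup? [] s.toList with - | ⟨i, c0⟩
    · -- no duplicate anywhere: both sides return none
      have hnone := firstDup?_none s.toList [] hfd
      have hsecs : ∀ c ∈ PySem.List.dedup s.toList, pvSecond s.toList c = -1 := by
        intro c hcm
        have hcl : c ∈ s.toList := (PySem.List.mem_dedup s.toList c).mp hcm
        by_contra hne
        obtain ⟨j, -, h1, h2, -⟩ := pvSecond_pos s.toList c hcl hne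
        exact hnone j (Nat.zero_le _) ⟨c, by simpa using h1, by simpa using h2⟩
      rw [twice, twice_alt, if_neg hlen, if_neg hlen, hA, hfd]
      rw [altLoop_none s.toList _ hsecs]
      simp
    · obtain ⟨-, hget, htake, hminA⟩ := firstDup?_some s.toList [] i c0 hfd
      rw [List.nil_append] at hget htake hminA
      have hc0l : c0 ∈ s.toList := List.mem_of_getElem? hget
      have hne : pvSecond s.toList c0 ≠ -1 := by
        intro hcon
        exact pvSecond_neg s.toList c0 hc0l hcon i ⟨hget, htake⟩
      obtain ⟨j, hj, hj1, hj2, hjmin⟩ := pvSecond_pos s.toList c0 hc0l hne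
      have hji : j = i := by
        rcases Nat.lt_trichotomy j i with h1 | h1 | h1
        · exact absurd ⟨c0, hj1, hj2⟩ (hminA j (Nat.zero_le _) h1)
        · exact h1
        · exact absurd ⟨hget, htake⟩ (hjmin i h1)
      rw [hji] at hj
      have hbound : ∀ c ∈ PySem.List.dedup s.toList,
          pvSecond s.toList c = -1 ∨ (i : Int) ≤ pvSecond s.toList c := by
        intro c hcm
        have hcl : c ∈ s.toList := (PySem.List.mem_dedup s.toList c).mp hcm
        by_cases hc1 : pvSecond s.toList c = -1
        · exact Or.inl hc1
        · obtain ⟨k, hk, hk1, hk2, -⟩ := pvSecond_pos s.toList c hcl hc1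
          have : ¬ k < i := fun hlt => hminA k (Nat.zero_le _) hlt ⟨c, hk1, hk2⟩
          right; rw [hk]; exact_mod_cast Nat.le_of_not_lt this
      have hbest : twiceAltLoop s.toList (PySem.List.dedup s.toList) (-1) = (i : Int) :=
        altLoop_reach s.toList i c0 (PySem.List.dedup s.toList)
          ((PySem.List.mem_dedup s.toList c0).mpr hc0l) hj hbound (-1) (Or.inl rfl)
      rw [twice, twice_alt, if_neg hlen, if_neg hlen, hA, hfd]
      simp only [hbest, Option.map_some]
      rw [if_neg (by omega)]
      rw [PySem.Chars.pyGet?, PySem.List.pyGet?_natCast, hget]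
      rfl

-- ===== VERDICT (by name: the statement is the Claim_ definition above) =====
theorem twice_spec : Claim_equal_twice := by
  intro s _ _
  unfold Spec_twice
  exact twice_eq_alt s
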